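-- pv_equiv track=rewrite | github.com/MBC-Studio/Introductory_practice_A_04XTodO70bzRjdO006k | task_A437.py | split_and_add
-- ===== SOURCE A (Python) =====
-- def split_and_add(arr, n):
--     if n == 0:  # Если итераций осталось 0, сразу возращаем исходный массива
--         return arr
--     middle = len(arr) // 2  # Ищём серидину массива, нацело поделива его длинну (если не чётное, округляется вниз)
--     a1 = arr[:middle]  # Первый список с начала, до середины (т.к. верхняя граница не учитывается, выбираем до неё)
--     a2 = arr[middle:]  # А второй с середины до конца
--     a1.reverse()  # Переворачиваем оба массива, что бы было удобно складывать
--     a2.reverse()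
--     ans = []
--     for i in range(len(a1)):  # Перебираем все элементы
--         ans.append(a1[i] + a2[i])  # И добавляем в новый массив
--     if len(a1) != len(a2):  # Если длины разные, то отдельно добавляем оставшийся элемент
--         ans.append(a2[len(a2) - 1])
--     ans.reverse()  # Переварачиваем массив обратно
--     return split_and_add(ans, n - 1)  # И вызываем функцию заново, только уменьшаем количество итераций
-- ===== SOURCE B (Python) =====
-- def split_and_add(arr, n):
--     result = arr
--     for _ in range(n):
--         m = len(result) // 2
--         off = len(result) - 2 * m
--         head = [result[m]] if off else []
--         result = head + [result[i] + result[m + off + i] for i in range(m)]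
--     return result
-- ===== Notes on version B (the rewrite author's own statement) =====
-- stated objective: simpler
-- what changed: Replaces A's n-deep recursion with reversed-half copies by an iterative loop whose fold step zips the two halves in place by index (no slicing, no reversals), returning arr unchanged when n == 0.
import Mathlib
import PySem

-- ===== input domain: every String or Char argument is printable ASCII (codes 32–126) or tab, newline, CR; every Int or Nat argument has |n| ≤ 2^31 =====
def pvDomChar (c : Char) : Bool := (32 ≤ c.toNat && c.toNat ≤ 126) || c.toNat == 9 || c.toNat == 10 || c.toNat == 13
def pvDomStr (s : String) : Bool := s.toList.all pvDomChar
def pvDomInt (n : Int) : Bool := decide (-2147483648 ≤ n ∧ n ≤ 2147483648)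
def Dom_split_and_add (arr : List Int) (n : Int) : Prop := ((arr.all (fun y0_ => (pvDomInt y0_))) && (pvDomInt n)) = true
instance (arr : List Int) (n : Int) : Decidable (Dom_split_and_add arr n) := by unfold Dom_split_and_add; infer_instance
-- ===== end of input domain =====

-- ===== PORT A =====
-- B is an iterative single-pass re-implementation (no reversals, no slicing); proved equal to A for n ≥ 0.
-- A recurses with n-1 until n == 0, so it never returns for n < 0 (RecursionError): Pre_ requires 0 ≤ n.
-- One fold step of A, transliterated: split at the middle, reverse both halves,
-- sum element-wise, append the leftover last element when lengths differ, reverse back.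
def pvStepA (arr : List Int) : List Int :=
  let middle := arr.length / 2
  let a1 := (arr.take middle).reverse
  let a2 := (arr.drop middle).reverse
  let ans := (List.range a1.length).foldl (fun acc i => acc ++ [a1.getD i 0 + a2.getD i 0]) []
  let ans := if a1.length ≠ a2.length then ans ++ [a2.getD (a2.length - 1) 0] else ans
  ans.reverse

-- A's recursion on n, with n.toNat as fuel (faithful for n ≥ 0; Python diverges for n < 0).
def pvGoA (arr : List Int) : Nat → List Int
  | 0 => arr
  | k + 1 => pvGoA (pvStepA arr) k

def split_and_add (arr : List Int) (n : Int) : List Int := pvGoA arr n.toNat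

-- ===== PORT B =====
-- B's fold step: zip the two halves of the list directly by index, no reversing or slicing.
def pvStepB (r : List Int) : List Int :=
  let m := r.length / 2
  let off := r.length - 2 * m
  let head := if off ≠ 0 then [r.getD m 0] else []
  head ++ (List.range m).map (fun i => r.getD i 0 + r.getD (m + off + i) 0)

def split_and_add_alt (arr : List Int) (n : Int) : List Int :=
  (List.range n.toNat).foldl (fun result _ => pvStepB result) arr

-- ===== PRECONDITION & SPEC =====
-- Pre_ excludes n < 0, where Python A recurses forever (RecursionError); A returns on every n ≥ 0.
def Pre_split_and_add (arr : List Int) (n : Int) : Prop := 0 ≤ n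
instance (arr : List Int) (n : Int) : Decidable (Pre_split_and_add arr n) := by
  unfold Pre_split_and_add; infer_instance

def pvWitness_split_and_add : List Int × Int := ([1, 2, 3], 2)

def Spec_split_and_add (arr : List Int) (n : Int) (out : List Int) : Prop := out = split_and_add_alt arr n
instance (arr : List Int) (n : Int) (out : List Int) : Decidable (Spec_split_and_add arr n out) := by
  unfold Spec_split_and_add; infer_instance

-- ===== CLAIM (what is proved, stated in full; the proofs are below) =====
def Claim_equal_split_and_add : Prop := ∀ (arr : List Int) (n : Int), Dom_split_and_add arr n → Pre_split_and_add arr n → Spec_split_and_add arr n (split_and_add arr n)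

-- ===== LEMMAS AND PROOFS =====

-- the leftover element of A's step (last of the reversed upper half) is the middle element of arr
theorem pv_head_eq (arr : List Int) (h : arr.length - 2 * (arr.length / 2) ≠ 0) :
    ((arr.drop (arr.length / 2)).reverse).getD ((arr.length - arr.length / 2) - 1) 0 =
    arr.getD (arr.length / 2) 0 := by
  have hL : arr.length / 2 < arr.length := by omega
  rw [List.getD_eq_getElem, List.getD_eq_getElem]
  all_goals try (simp only [List.length_reverse, List.length_drop]; omega)
  all_goals try omega
  simp only [List.getElem_reverse, List.getElem_drop, List.length_drop]
  exact getElem_congr rfl (by omega) (by omega)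

-- the summed middle part of A's step, un-reversed, is B's direct two-pointer map
theorem pv_tail_eq (arr : List Int) :
    ((List.range (arr.length / 2)).map (fun i =>
        ((arr.take (arr.length / 2)).reverse).getD i 0 +
        ((arr.drop (arr.length / 2)).reverse).getD i 0)).reverse =
    (List.range (arr.length / 2)).map (fun i =>
        arr.getD i 0 + arr.getD (arr.length / 2 + (arr.length - 2 * (arr.length / 2)) + i) 0) := by
  apply List.ext_getElem
  · simp
  · intro j h1 h2
    simp only [List.length_reverse, List.length_map, List.length_range] at h1 h2
    have hL : arr.length / 2 ≤ arr.length := Nat.div_le_self _ _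
    simp only [List.getElem_reverse, List.length_map, List.length_range, List.getElem_map,
      List.getElem_range]
    rw [List.getD_eq_getElem, List.getD_eq_getElem, List.getD_eq_getElem, List.getD_eq_getElem]
    all_goals try (simp only [List.length_reverse, List.length_take, List.length_drop]; omega)
    simp only [List.getElem_reverse, List.getElem_take, List.getElem_drop,
      List.length_take, List.length_drop]
    congr 1
    · exact getElem_congr rfl (by omega) (by omega)
    · exact getElem_congr rfl (by omega) (by omega)

theorem pv_step_eq (arr : List Int) : pvStepA arr = pvStepB arr := by
  unfold pvStepA pvStepB
  have hL : arr.length / 2 ≤ arr.length := Nat.div_le_self _ _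
  simp only [PySem.List.foldl_append_singleton_eq_map, List.nil_append,
    List.length_reverse, List.length_take, List.length_drop, Nat.min_eq_left hL]
  split_ifs with h1 h2 h2
  · -- odd length: extra head element
    rw [List.reverse_append, List.reverse_singleton, List.singleton_append, pv_tail_eq,
      List.singleton_append]
    exact congrArg (· :: _) (pv_head_eq arr h2)
  · exact absurd (by omega : arr.length - 2 * (arr.length / 2) ≠ 0) h2
  · exact absurd (by omega : arr.length / 2 ≠ arr.length - arr.length / 2) h1
  · rw [List.nil_append, pv_tail_eq]

theorem pv_go_eq (k : Nat) : ∀ arr : List Int,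
    pvGoA arr k = (List.range k).foldl (fun r _ => pvStepB r) arr := by
  induction k with
  | zero => intro arr; rfl
  | succ k ih =>
    intro arr
    rw [List.range_succ_eq_map, List.foldl_cons, List.foldl_map]
    show pvGoA (pvStepA arr) k = _
    rw [ih, pv_step_eq]

-- ===== VERDICT (by name: the statement is the Claim_ definition above) =====
theorem split_and_add_spec : Claim_equal_split_and_add := by
  intro arr n _ _
  unfold Spec_split_and_add split_and_add split_and_add_alt
  exact pv_go_eq n.toNat arr
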